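-- pv_equiv track=rewrite | github.com/smilesometimes/Poetry-Form-Checker | poetry_functions.py | is_rhyme
-- ===== SOURCE A (Python) =====
-- def is_rhyme(rhyme_str,rhyme_lst,rhyme_pronounciation_lst):
--     """(str, list of int, list of str) -> True
--
--     If all lines whose index is in rhyme_lst rhyme as they should, return the true.
--
--     >>> rhyme_str = 'A'
--     >>> rhyme_lst = [0, 2]
--     >>> rhyme_pronounciation_lst = ['AO1F', 'AH0', 'EH1NDZ']
--     >>> is_rhyme(rhyme_str,rhyme_lst,rhyme_pronounciation_lst)
--     False
--     """
--
--     result = True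
--     if rhyme_str != '*' and len(rhyme_lst) > 1:
--         for i in range(len(rhyme_lst)-1):
--             n1 = rhyme_lst[i]
--             n2 = rhyme_lst[i+1]
--             if rhyme_pronounciation_lst[n1] != rhyme_pronounciation_lst[n2]:
--                 result = False
--     return result
-- ===== SOURCE B (Python) =====
-- def is_rhyme(rhyme_str, rhyme_lst, rhyme_pronounciation_lst):
--     if rhyme_str == '*' or len(rhyme_lst) <= 1:
--         return True
--     return len({rhyme_pronounciation_lst[i] for i in rhyme_lst}) <= 1
-- ===== Notes on version B (the rewrite author's own statement) =====
-- stated objective: simpler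
-- what changed: Replaces the adjacent-pair scanning loop with a running False flag by collecting the pronunciations at all listed indices into a set and checking that at most one distinct pronunciation occurs.
import Mathlib
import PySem

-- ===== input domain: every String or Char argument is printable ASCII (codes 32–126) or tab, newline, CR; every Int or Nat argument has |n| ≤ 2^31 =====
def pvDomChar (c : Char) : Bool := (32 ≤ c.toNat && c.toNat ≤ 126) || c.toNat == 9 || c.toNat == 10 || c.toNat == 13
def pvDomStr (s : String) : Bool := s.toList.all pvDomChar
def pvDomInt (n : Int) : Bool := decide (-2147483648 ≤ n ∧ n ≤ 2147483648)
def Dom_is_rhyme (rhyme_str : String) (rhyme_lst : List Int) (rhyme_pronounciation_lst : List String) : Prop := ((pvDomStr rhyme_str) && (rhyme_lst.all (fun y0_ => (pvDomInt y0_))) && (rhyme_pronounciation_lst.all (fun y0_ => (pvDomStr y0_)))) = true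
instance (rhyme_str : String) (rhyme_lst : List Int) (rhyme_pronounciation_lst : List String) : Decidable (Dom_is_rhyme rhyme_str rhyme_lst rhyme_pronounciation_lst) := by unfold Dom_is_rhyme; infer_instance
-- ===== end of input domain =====

-- B replaces A's adjacent-pair scanning loop (running False flag) by collecting the
-- pronunciations at all listed indices into a set and checking it holds at most one
-- distinct pronunciation (objective: simpler).


-- ===== PORT A =====
-- flag loop over adjacent pairs; list indexing ported with PySem.List.pyGet?
-- (none = IndexError, excluded by Pre_)
def is_rhyme (rhyme_str : String) (rhyme_lst : List Int) (rhyme_pronounciation_lst : List String) : Bool :=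
  if rhyme_str ≠ "*" ∧ 1 < rhyme_lst.length then
    (List.range (rhyme_lst.length - 1)).foldl
      (fun result i =>
        let n1 := rhyme_lst.getD i 0
        let n2 := rhyme_lst.getD (i + 1) 0
        if PySem.List.pyGet? rhyme_pronounciation_lst n1 ≠ PySem.List.pyGet? rhyme_pronounciation_lst n2 then
          false
        else result)
      true
  else true

-- ===== PORT B =====
-- set comprehension over the listed indices, then size check
def is_rhyme_alt (rhyme_str : String) (rhyme_lst : List Int) (rhyme_pronounciation_lst : List String) : Bool :=
  if rhyme_str = "*" ∨ rhyme_lst.length ≤ 1 then true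
  else
    decide (PySem.Set.len
      (PySem.Set.ofList (rhyme_lst.map (fun i => PySem.List.pyGet? rhyme_pronounciation_lst i))) ≤ 1)

-- ===== PRECONDITION & SPEC =====
-- Pre_ excludes exactly the inputs where Python A raises IndexError: when the guard
-- fires, every index in rhyme_lst must be in range of rhyme_pronounciation_lst.
def Pre_is_rhyme (rhyme_str : String) (rhyme_lst : List Int) (rhyme_pronounciation_lst : List String) : Prop :=
  rhyme_str = "*" ∨ rhyme_lst.length ≤ 1 ∨
    ∀ i ∈ rhyme_lst, PySem.Raise.InRange rhyme_pronounciation_lst.length i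
instance (rhyme_str : String) (rhyme_lst : List Int) (rhyme_pronounciation_lst : List String) : Decidable (Pre_is_rhyme rhyme_str rhyme_lst rhyme_pronounciation_lst) := by unfold Pre_is_rhyme; infer_instance

def pvWitness_is_rhyme : String × List Int × List String := ("A", [0, 2], ["AO1F", "AH0", "EH1NDZ"])

def Spec_is_rhyme (rhyme_str : String) (rhyme_lst : List Int) (rhyme_pronounciation_lst : List String) (out : Bool) : Prop := out = is_rhyme_alt rhyme_str rhyme_lst rhyme_pronounciation_lst
instance (rhyme_str : String) (rhyme_lst : List Int) (rhyme_pronounciation_lst : List String) (out : Bool) : Decidable (Spec_is_rhyme rhyme_str rhyme_lst rhyme_pronounciation_lst out) := by unfold Spec_is_rhyme; infer_instance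

-- ===== CLAIM (what is proved, stated in full; the proofs are below) =====
def Claim_equal_is_rhyme : Prop := ∀ (rhyme_str : String) (rhyme_lst : List Int) (rhyme_pronounciation_lst : List String), Dom_is_rhyme rhyme_str rhyme_lst rhyme_pronounciation_lst → Pre_is_rhyme rhyme_str rhyme_lst rhyme_pronounciation_lst → Spec_is_rhyme rhyme_str rhyme_lst rhyme_pronounciation_lst (is_rhyme rhyme_str rhyme_lst rhyme_pronounciation_lst)

-- ===== LEMMAS AND PROOFS =====

-- A's flag loop is an 'all' over the traversed indices.
theorem foldl_false {α : Type} (p : α → Prop) [DecidablePred p] (l : List α) :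
    l.foldl (fun r i => if p i then false else r) false = false := by
  induction l with
  | nil => rfl
  | cons x t ih => simp only [List.foldl, ite_self]; exact ih

theorem foldl_flag {α : Type} (p : α → Prop) [DecidablePred p] (l : List α) (b : Bool) :
    l.foldl (fun r i => if p i then false else r) b = (b && l.all (fun i => !decide (p i))) := by
  induction l generalizing b with
  | nil => simp
  | cons x t ih =>
    by_cases h : p x
    · simp only [List.foldl]
      rw [if_pos h, foldl_false]
      simp [h]
    · simp only [List.foldl]
      rw [if_neg h, ih]
      simp [h]

-- adjacent equality along a list is global equality of its elements
theorem chain_iff_all_eq {T : Type} (ys : List T) :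
    (∀ i : Nat, i + 1 < ys.length → ys[i]? = ys[i + 1]?) ↔ (∀ x ∈ ys, ∀ y ∈ ys, x = y) := by
  constructor
  · intro h x hx y hy
    have key : ∀ j : Nat, j < ys.length → ys[j]? = ys[0]? := by
      intro j hj
      induction j with
      | zero => rfl
      | succ k ih =>
        have hk : k < ys.length := by omega
        rw [← h k (by omega)]; exact ih hk
    obtain ⟨ix, hix, rfl⟩ := List.mem_iff_getElem.mp hx
    obtain ⟨iy, hiy, rfl⟩ := List.mem_iff_getElem.mp hy
    have h1 := key ix hix
    have h2 := key iy hiy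
    rw [List.getElem?_eq_getElem hix] at h1
    rw [List.getElem?_eq_getElem hiy] at h2
    rw [← h2] at h1
    exact Option.some.inj h1
  · intro h i hi
    have h1 : i < ys.length := by omega
    rw [List.getElem?_eq_getElem h1, List.getElem?_eq_getElem hi]
    exact congrArg some (h _ (List.getElem_mem _) _ (List.getElem_mem _))

theorem foldl_add_const {T : Type} [BEq T] [LawfulBEq T] (a : T) (t : List T)
    (h : ∀ x ∈ t, x = a) : t.foldl PySem.Set.add [a] = [a] := by
  induction t with
  | nil => rfl
  | cons y ys ih =>
    have hy : y = a := h y (by simp)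
    have : PySem.Set.add [a] y = [a] := by
      rw [hy]; exact PySem.Set.add_of_mem (by simp)
    simp only [List.foldl, this]
    exact ih (fun x hx => h x (by simp [hx]))

-- the set of a nonempty list has ≤ 1 element iff all list elements are equal
theorem set_len_le_one_iff {T : Type} [BEq T] [LawfulBEq T] (ys : List T) (hne : ys ≠ []) :
    PySem.Set.len (PySem.Set.ofList ys) ≤ 1 ↔ (∀ x ∈ ys, ∀ y ∈ ys, x = y) := by
  constructor
  · intro h x hx y hy
    have hx' : x ∈ PySem.Set.ofList ys := (PySem.Set.mem_ofList ys x).mpr hx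
    have hy' : y ∈ PySem.Set.ofList ys := (PySem.Set.mem_ofList ys y).mpr hy
    match hs : PySem.Set.ofList ys with
    | [] => rw [hs] at hx'; simp at hx'
    | [z] => rw [hs] at hx' hy'; simp at hx' hy'; rw [hx', hy']
    | z1 :: z2 :: zs =>
      exfalso
      have hlen : PySem.Set.len (PySem.Set.ofList ys) = ((PySem.Set.ofList ys).length : Int) := rfl
      rw [hlen, hs] at h; simp at h; omega
  · intro h
    cases ys with
    | nil => exact absurd rfl hne
    | cons a t =>
      have ha : ∀ x ∈ t, x = a := by
        intro x hx
        exact h x (by simp [hx]) a (by simp)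
      have hof : PySem.Set.ofList (a :: t) = [a] := by
        rw [PySem.Set.ofList_eq_foldl]
        simp only [List.foldl]
        have hadd : PySem.Set.add [] a = [a] := rfl
        rw [hadd]
        exact foldl_add_const a t ha
      rw [hof]
      simp [PySem.Set.len]

-- ===== VERDICT (by name: the statement is the Claim_ definition above) =====
theorem is_rhyme_spec : Claim_equal_is_rhyme := by
  intro s lst pron _ hpre
  unfold Spec_is_rhyme is_rhyme is_rhyme_alt
  by_cases hg : s = "*" ∨ lst.length ≤ 1
  · have : ¬ (s ≠ "*" ∧ 1 < lst.length) := by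
      rcases hg with h | h
      · exact fun ⟨h1, _⟩ => h1 h
      · exact fun ⟨_, h2⟩ => by omega
    simp [this, hg]
  · push Not at hg
    obtain ⟨hs, hlen⟩ := hg
    have hguard : s ≠ "*" ∧ 1 < lst.length := ⟨hs, by omega⟩
    rw [if_pos hguard, if_neg (by push Not; exact ⟨hs, by omega⟩)]
    set ys : List (Option String) := lst.map (fun i => PySem.List.pyGet? pron i) with hys
    have hylen : ys.length = lst.length := by simp [hys]
    have hyne : ys ≠ [] := by
      intro h; rw [h] at hylen; simp at hylen; omega
    rw [foldl_flag (fun i : Nat =>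
        PySem.List.pyGet? pron (lst.getD i 0) ≠ PySem.List.pyGet? pron (lst.getD (i+1) 0))]
    rw [Bool.true_and]
    have step : (List.range (lst.length - 1)).all
        (fun i => !decide (PySem.List.pyGet? pron (lst.getD i 0) ≠ PySem.List.pyGet? pron (lst.getD (i+1) 0)))
        = decide (∀ x ∈ ys, ∀ y ∈ ys, x = y) := by
      rcases Bool.eq_false_or_eq_true ((List.range (lst.length - 1)).all
        (fun i => !decide (PySem.List.pyGet? pron (lst.getD i 0) ≠ PySem.List.pyGet? pron (lst.getD (i+1) 0)))) with hall | hall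
      all_goals rw [hall]
      · symm
        rw [decide_eq_true_eq, ← chain_iff_all_eq]
        rw [List.all_eq_true] at hall
        intro i hi1
        have hgi1 : i + 1 < lst.length := by omega
        have hgi : i < lst.length := by omega
        have hx := hall i (by simp; omega)
        simp only [Bool.not_eq_eq_eq_not, Bool.not_true, decide_eq_false_iff_not, ne_eq,
          Decidable.not_not] at hx
        rw [List.getD_eq_getElem lst 0 hgi, List.getD_eq_getElem lst 0 hgi1] at hx
        rw [hys]
        simp only [List.getElem?_map, List.getElem?_eq_getElem hgi, List.getElem?_eq_getElem hgi1,
          Option.map_some]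
        exact congrArg some hx
      · symm
        rw [decide_eq_false_iff_not, ← chain_iff_all_eq]
        rw [List.all_eq_false] at hall
        obtain ⟨i, hi, hcond⟩ := hall
        simp only [List.mem_range] at hi
        rw [Bool.not_eq_true, Bool.not_eq_false', decide_eq_true_eq] at hcond
        intro hchain
        have hi1 : i + 1 < ys.length := by omega
        have hch := hchain i hi1
        have hgi : i < lst.length := by omega
        have hgi1 : i + 1 < lst.length := by omega
        rw [hys] at hch
        simp only [List.getElem?_map, List.getElem?_eq_getElem hgi, List.getElem?_eq_getElem hgi1,
          Option.map_some] at hch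
        rw [List.getD_eq_getElem lst 0 hgi, List.getD_eq_getElem lst 0 hgi1] at hcond
        exact hcond (Option.some.inj hch)
    rw [step]
    rw [decide_eq_decide]
    exact (set_len_le_one_iff ys hyne).symm
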